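-- pv_equiv track=rewrite | github.com/terrytykuo/cat_toxin_db | process_plants.py | normalize_severity
-- ===== SOURCE A (Python) =====
-- VALID_SEVERITIES = {"mild", "moderate", "severe", "fatal"}
--
-- SEVERITY_RANK = {"mild": 1, "moderate": 2, "severe": 3, "fatal": 4}
--
-- def normalize_severity(val):
--     """Normalize a severity value to one of: mild, moderate, severe, fatal.
--
--     Handles cases like 'Mild to Severe.', 'Moderate to Severe.', 'Potentially Severe.'
--     by extracting valid severity words and picking the highest.
--     """
--     if not val:
--         return None
--     cleaned = val.strip().lower().rstrip('.')
--
--     # Direct match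
--     if cleaned in VALID_SEVERITIES:
--         return cleaned
--
--     # Find all valid severity words in the string
--     found = []
--     for sev in VALID_SEVERITIES:
--         if sev in cleaned:
--             found.append(sev)
--
--     if found:
--         # Pick the highest severity mentioned
--         return max(found, key=lambda s: SEVERITY_RANK[s])
--
--     return None  # Can't determine — will be flagged by verify
-- ===== SOURCE B (Python) =====
-- SEVERITIES_DESC = ["fatal", "severe", "moderate", "mild"]
--
-- def normalize_severity(val):
--     if not val:
--         return None
--     cleaned = val.strip().lower().rstrip('.')
--     for sev in SEVERITIES_DESC:
--         if sev in cleaned: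
--             return sev
--     return None
-- ===== Notes on version B (the rewrite author's own statement) =====
-- stated objective: simpler
-- what changed: Replaced A's direct-match branch plus collect-all-matches-then-max-by-rank with a single early-return scan over a priority-ordered severity list (highest first), dropping the found accumulator, the rank dict and the max call.
import Mathlib
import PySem

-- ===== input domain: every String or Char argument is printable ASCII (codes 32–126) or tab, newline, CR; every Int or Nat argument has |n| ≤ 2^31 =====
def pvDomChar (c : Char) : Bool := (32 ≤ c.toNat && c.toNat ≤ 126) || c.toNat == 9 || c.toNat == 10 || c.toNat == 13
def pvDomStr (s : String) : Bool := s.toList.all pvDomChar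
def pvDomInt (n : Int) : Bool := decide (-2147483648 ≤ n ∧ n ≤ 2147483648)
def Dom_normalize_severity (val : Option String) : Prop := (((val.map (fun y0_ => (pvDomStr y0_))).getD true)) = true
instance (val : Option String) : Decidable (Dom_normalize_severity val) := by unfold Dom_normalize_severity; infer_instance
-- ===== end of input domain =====

-- B replaces A's direct-match branch and collect-then-max-by-rank with a single
-- early-return scan over a priority-ordered severity list (simpler decomposition, same cost).


-- ===== PORT A =====
-- rstrip('.') ported by hand (PySem has no right-strip with a chars argument):
-- drop trailing '.' characters; exact for this single-character case.
def pvRstripDot (cs : List Char) : List Char := (cs.reverse.dropWhile (· == '.')).reverse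

-- val.strip().lower().rstrip('.')  (shared cleaning expression; both Pythons contain it literally)
def pvClean (v : String) : String :=
  String.mk (pvRstripDot (PySem.Str.lower (PySem.Str.strip v)).toList)

def pvValidSeverities : PySem.Set String := PySem.Set.ofList ["mild", "moderate", "severe", "fatal"]

def pvSeverityRank : PySem.Dict String Int :=
  PySem.Dict.ofList [("mild", 1), ("moderate", 2), ("severe", 3), ("fatal", 4)]

def normalize_severity (val : Option String) : Option String :=
  match val with
  | none => none
  | some v =>
    if v = "" then none
    else
      let cleaned := pvClean v
      if pvValidSeverities.contains cleaned then some cleaned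
      else
        let found := pvValidSeverities.foldl
          (fun acc sev => if PySem.Str.isIn sev cleaned then acc ++ [sev] else acc) []
        match found with
        | [] => none
        -- max(found, key=lambda s: SEVERITY_RANK[s]); found is nonempty here and every
        -- element is a key of SEVERITY_RANK, so getD's defaults are never used.
        | f :: fs => some (PySem.List.maxD (f :: fs) (fun s => pvSeverityRank.getD s 0) "")

-- ===== PORT B =====
def pvSeveritiesDesc : List String := ["fatal", "severe", "moderate", "mild"]

-- the for-loop of B: return the first severity that is a substring of cleaned
def pvScan : List String → String → Option String
  | [], _ => none
  | s :: rest, cleaned =>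
    if PySem.Str.isIn s cleaned then some s else pvScan rest cleaned

def normalize_severity_alt (val : Option String) : Option String :=
  match val with
  | none => none
  | some v =>
    if v = "" then none
    else pvScan pvSeveritiesDesc (pvClean v)

-- ===== PRECONDITION & SPEC =====
def Spec_normalize_severity (val : Option String) (out : Option String) : Prop := out = normalize_severity_alt val
instance (val : Option String) (out : Option String) : Decidable (Spec_normalize_severity val out) := by unfold Spec_normalize_severity; infer_instance

-- ===== CLAIM (what is proved, stated in full; the proofs are below) =====
def Claim_equal_normalize_severity : Prop := ∀ (val : Option String), Dom_normalize_severity val → Spec_normalize_severity val (normalize_severity val)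

-- ===== LEMMAS AND PROOFS =====

-- core equivalence, for an arbitrary cleaned string
lemma pv_key (c : String) :
    (if pvValidSeverities.contains c then some c
     else
       match pvValidSeverities.foldl
           (fun acc sev => if PySem.Str.isIn sev c then acc ++ [sev] else acc) [] with
       | [] => none
       | f :: fs => some (PySem.List.maxD (f :: fs) (fun s => pvSeverityRank.getD s 0) "")) =
    pvScan pvSeveritiesDesc c := by
  by_cases hm : pvValidSeverities.contains c = true
  · -- direct match: c is one of the four literals; everything is closed
    have : c = "mild" ∨ c = "moderate" ∨ c = "severe" ∨ c = "fatal" := by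
      simpa [pvValidSeverities, PySem.Set.ofList, PySem.List.dedup] using hm
    rcases this with h | h | h | h <;> subst h <;> decide
  · rw [if_neg (by simpa using hm)]
    by_cases h4 : PySem.Str.isIn "fatal" c = true <;>
    by_cases h3 : PySem.Str.isIn "severe" c = true <;>
    by_cases h2 : PySem.Str.isIn "moderate" c = true <;>
    by_cases h1 : PySem.Str.isIn "mild" c = true <;>
      simp at h1 h2 h3 h4 <;>
      simp [h1, h2, h3, h4, pvValidSeverities, pvSeveritiesDesc, PySem.Set.ofList,
            PySem.List.dedup, pvScan, PySem.List.maxD, PySem.List.max?, pvSeverityRank,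
            PySem.Dict.getD, PySem.Dict.get?, PySem.Dict.ofList] <;>
      decide

theorem normalize_severity_spec : Claim_equal_normalize_severity := by
  intro val _
  unfold Spec_normalize_severity normalize_severity normalize_severity_alt
  cases val with
  | none => rfl
  | some v =>
    by_cases hv : v = ""
    · simp [hv]
    · simp only [hv, if_false]
      exact pv_key (pvClean v)
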